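-- pv_equiv track=rewrite | github.com/ayushmohod/SC1-Emperical-Study-Group6 | top20/scripts/lpf.py | parse_contract_code
-- ===== SOURCE A (Python) =====
-- def parse_contract_code(contract_code):
--     function_code_dict = {}
--     contract_lines = contract_code.split("\n")
--     current_function_code = ""
--     current_function_name = ""
--     for line in contract_lines:
--         if "function " in line:
--             # save the previous function's code, if any
--             if current_function_name != "":
--                 function_code_dict[current_function_name] = current_function_code.strip()
--             # start a new function
--             current_function_code = line + "\n"
--             current_function_name = line.split("function ")[1].split("(")[0]
--         else:
--             # add the line to the current function's code
--             current_function_code += line + "\n"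
--     # save the last function's code
--     if current_function_name != "":
--         function_code_dict[current_function_name] = current_function_code.strip()
--     return function_code_dict
-- ===== SOURCE B (Python) =====
-- def parse_contract_code(contract_code):
--     lines = contract_code.split("\n")
--     bounds = [i for i, line in enumerate(lines) if "function " in line]
--     result = {}
--     for start, end in zip(bounds, bounds[1:] + [len(lines)]):
--         name = lines[start].split("function ")[1].split("(")[0]
--         if name:
--             result[name] = "\n".join(lines[start:end]).strip()
--     return result
-- ===== Notes on version B (the rewrite author's own statement) =====
-- stated objective: alternative
-- what changed: Replaces A's single pass with a running string accumulator, current-name state and flush-on-boundary/at-end logic by a two-phase index approach: first collect the indices of all boundary lines (lines containing the function-keyword marker), then for each consecutive index pair slice lines[start:end], join and strip the segment, and assign it under the extracted name (skipping boundary lines whose extracted name is empty, exactly as A's empty-name guard does).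
import Mathlib
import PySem

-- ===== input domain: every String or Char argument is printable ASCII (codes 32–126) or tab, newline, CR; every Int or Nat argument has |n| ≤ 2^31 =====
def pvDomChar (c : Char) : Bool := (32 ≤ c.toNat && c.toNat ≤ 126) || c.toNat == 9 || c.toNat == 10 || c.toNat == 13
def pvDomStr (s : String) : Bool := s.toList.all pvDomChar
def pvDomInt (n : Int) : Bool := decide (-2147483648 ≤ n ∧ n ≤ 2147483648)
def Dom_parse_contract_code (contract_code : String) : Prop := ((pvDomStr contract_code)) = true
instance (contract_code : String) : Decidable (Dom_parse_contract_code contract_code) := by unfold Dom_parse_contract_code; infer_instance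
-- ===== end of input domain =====

-- B replaces A's one-pass accumulator (running code string, current name, flush-on-boundary) by a
-- two-phase index approach: collect the boundary-line indices, then slice/join/strip each segment
-- between consecutive boundaries; same return value (objective: alternative, not faster).

-- ===== PORT A =====
-- shared helpers: s.split(sep) for a non-empty literal sep (split? is none only for sep = "", unreachable here),
-- and the name extraction line.split("function ")[1].split("(")[0] both programs use verbatim
def pySplit (s sep : String) : List String := (PySem.Str.split? s sep).getD []

def pcIsFn (line : String) : Bool := PySem.Str.isIn "function " line

def pcName (line : String) : String :=
  PySem.List.pyGetD (pySplit (PySem.List.pyGetD (pySplit line "function ") 1 "") "(") 0 ""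

-- the body of A's for-loop, on state (function_code_dict, current_function_code, current_function_name)
def pcAStep (st : PySem.Dict String String × String × String) (line : String) :
    PySem.Dict String String × String × String :=
  if pcIsFn line then
    ((if st.2.2 ≠ "" then st.1.insert st.2.2 (PySem.Str.strip st.2.1) else st.1),
     line ++ "\n", pcName line)
  else
    (st.1, st.2.1 ++ line ++ "\n", st.2.2)

-- A's trailing "save the last function's code"
def pcAFin (st : PySem.Dict String String × String × String) : PySem.Dict String String :=
  if st.2.2 ≠ "" then st.1.insert st.2.2 (PySem.Str.strip st.2.1) else st.1

def parse_contract_code (contract_code : String) : List (String × String) :=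
  let contract_lines := pySplit contract_code "\n"
  (pcAFin (contract_lines.foldl pcAStep (PySem.Dict.empty, "", ""))).items

-- ===== PORT B =====
-- the body of B's for-loop over consecutive boundary pairs (start, end)
def pcBStep (lines : List String) (d : PySem.Dict String String) (se : Int × Int) :
    PySem.Dict String String :=
  let name := pcName (PySem.List.pyGetD lines se.1 "")
  if name ≠ "" then
    d.insert name (PySem.Str.strip (PySem.Str.join "\n" (PySem.List.slice lines (some se.1) (some se.2))))
  else d

def parse_contract_code_alt (contract_code : String) : List (String × String) :=
  let lines := pySplit contract_code "\n"
  let bounds : List Int := ((PySem.List.enumerate lines).filter (fun p => pcIsFn p.2)).map (fun p => p.1)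
  let pairs := bounds.zip (PySem.List.slice bounds (some 1) none ++ [(lines.length : Int)])
  (pairs.foldl (pcBStep lines) PySem.Dict.empty).items

-- ===== PRECONDITION & SPEC =====
def Spec_parse_contract_code (contract_code : String) (out : List (String × String)) : Prop := out = parse_contract_code_alt contract_code
instance (contract_code : String) (out : List (String × String)) : Decidable (Spec_parse_contract_code contract_code out) := by unfold Spec_parse_contract_code; infer_instance

-- ===== CLAIM (what is proved, stated in full; the proofs are below) =====
def Claim_equal_parse_contract_code : Prop := ∀ (contract_code : String), Dom_parse_contract_code contract_code → Spec_parse_contract_code contract_code (parse_contract_code contract_code)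

-- ===== LEMMAS AND PROOFS =====

-- the common abstraction both ports are reduced to: the maximal segments of the line list,
-- each starting at a boundary line ("function " in line), lines before the first boundary dropped
def pcGrps : List String → List (List String)
  | [] => []
  | l :: t =>
    if pcIsFn l then
      (l :: t.takeWhile (fun x => !pcIsFn x)) :: pcGrps (t.dropWhile (fun x => !pcIsFn x))
    else pcGrps t
termination_by t => t.length
decreasing_by
  · simpa using Nat.lt_succ_of_le (List.length_dropWhile_le _ _)
  · simp

def pcStep (d : PySem.Dict String String) (seg : List String) : PySem.Dict String String :=
  let name := pcName (seg.headD "")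
  if name ≠ "" then d.insert name (PySem.Str.strip (PySem.Str.join "\n" seg)) else d

-- A's accumulated code for a list of non-boundary lines: each line followed by "\n"
def pcJoinNl : List String → String
  | [] => ""
  | l :: t => l ++ "\n" ++ pcJoinNl t

-- the boundary indices, in Nat
def pcBnd (k : Nat) : List String → List Nat
  | [] => []
  | l :: t => if pcIsFn l then k :: pcBnd (k + 1) t else pcBnd (k + 1) t

lemma pc_chars_strip_append_nl (cs : List Char) :
    PySem.Chars.strip (cs ++ ['\n']) = PySem.Chars.strip cs := by
  have hnl : PySem.Chars.isspace '\n' = true := by decide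
  have hr : ∀ ds : List Char, PySem.Chars.rstrip (ds ++ ['\n']) = PySem.Chars.rstrip ds := by
    intro ds
    simp only [PySem.Chars.rstrip, List.reverse_append, List.reverse_cons, List.reverse_nil,
      List.nil_append, List.singleton_append, List.dropWhile_cons, hnl, if_true]
  simp only [PySem.Chars.strip, PySem.Chars.lstrip, List.dropWhile_append]
  split
  · next h =>
    have h0 : List.dropWhile PySem.Chars.isspace cs = [] := by simpa [List.isEmpty_iff] using h
    rw [h0]
    simp [hnl]
  · exact hr _

lemma pc_strip_append_nl (s : String) : PySem.Str.strip (s ++ "\n") = PySem.Str.strip s := by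
  apply String.toList_inj.mp
  simp only [PySem.Str.toList_strip, String.toList_append]
  rw [show ("\n" : String).toList = ['\n'] by decide]
  exact pc_chars_strip_append_nl _

lemma pc_joinNl_eq (l : String) (t : List String) :
    l ++ "\n" ++ pcJoinNl t = PySem.Str.join "\n" (l :: t) ++ "\n" := by
  induction t generalizing l with
  | nil =>
    apply String.toList_inj.mp
    simp [pcJoinNl, PySem.Str.toList_join, PySem.Chars.join_singleton]
  | cons m t ih =>
    show l ++ "\n" ++ (m ++ "\n" ++ pcJoinNl t) = _
    rw [ih m]
    apply String.toList_inj.mp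
    simp only [String.toList_append, PySem.Str.toList_join, List.map_cons]
    rw [PySem.Chars.join_cons_cons]
    simp

lemma pc_strip_joinNl (l : String) (t : List String) :
    PySem.Str.strip (l ++ "\n" ++ pcJoinNl t) = PySem.Str.strip (PySem.Str.join "\n" (l :: t)) := by
  rw [pc_joinNl_eq, pc_strip_append_nl]

lemma pcGrps_nil : pcGrps [] = [] := by simp [pcGrps]

lemma pcGrps_cons_pos (l : String) (t : List String) (h : pcIsFn l = true) :
    pcGrps (l :: t) =
      (l :: t.takeWhile (fun x => !pcIsFn x)) :: pcGrps (t.dropWhile (fun x => !pcIsFn x)) := by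
  rw [pcGrps]; simp [h]

lemma pcGrps_cons_neg (l : String) (t : List String) (h : pcIsFn l = false) :
    pcGrps (l :: t) = pcGrps t := by
  rw [pcGrps]; simp [h]

lemma pcGrps_append_notFn (a r : List String) (h : ∀ x ∈ a, pcIsFn x = false) :
    pcGrps (a ++ r) = pcGrps r := by
  induction a with
  | nil => rfl
  | cons x a ih =>
    simp only [List.cons_append]
    rw [pcGrps_cons_neg _ _ (h x (by simp))]
    exact ih (fun y hy => h y (by simp [hy]))

lemma pcBnd_append_notFn (a : List String) (r : List String) (k : Nat)
    (h : ∀ x ∈ a, pcIsFn x = false) : pcBnd k (a ++ r) = pcBnd (k + a.length) r := by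
  induction a generalizing k with
  | nil => simp
  | cons x a ih =>
    simp only [List.cons_append, pcBnd, h x (by simp), Bool.false_eq_true, if_false]
    rw [ih (k + 1) (fun y hy => h y (by simp [hy]))]
    congr 1
    simp
    ring

lemma pcBnd_shift (t : List String) (k j : Nat) :
    pcBnd (j + k) t = (pcBnd j t).map (· + k) := by
  induction t generalizing j with
  | nil => simp [pcBnd]
  | cons x t ih =>
    simp only [pcBnd]
    by_cases h : pcIsFn x
    · simp only [h, if_true, List.map_cons]
      rw [show j + k + 1 = (j + 1) + k by ring, ih]
    · simp only [h, if_false, Bool.false_eq_true]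
      rw [show j + k + 1 = (j + 1) + k by ring, ih]

lemma pcBnd_eq_nil (t : List String) (k : Nat) (h : ∀ x ∈ t, pcIsFn x = false) :
    pcBnd k t = [] := by
  have := pcBnd_append_notFn t [] k h
  simpa using this

lemma pcBnd_nil_all (t : List String) (k : Nat) (h : pcBnd k t = []) :
    ∀ x ∈ t, pcIsFn x = false := by
  induction t generalizing k with
  | nil => simp
  | cons x t ih =>
    simp only [pcBnd] at h
    by_cases hx : pcIsFn x
    · simp [hx] at h
    · intro y hy
      rcases List.mem_cons.mp hy with rfl | hy
      · simpa using hx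
      · exact ih (k + 1) (by simpa [hx] using h) y hy

-- A-side: the accumulator loop computes the fold of pcStep over the segments
lemma pcA_main (t : List String) :
    (∀ d c, pcAFin (t.foldl pcAStep (d, c, "")) = (pcGrps t).foldl pcStep d) ∧
    (∀ d c n, n ≠ "" →
      pcAFin (t.foldl pcAStep (d, c, n)) =
        (pcGrps (t.dropWhile (fun x => !pcIsFn x))).foldl pcStep
          (d.insert n (PySem.Str.strip (c ++ pcJoinNl (t.takeWhile (fun x => !pcIsFn x)))))) := by
  induction t with
  | nil =>
    refine ⟨fun d c => by simp [pcAFin, pcGrps_nil], fun d c n hn => ?_⟩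
    simp [pcAFin, hn, pcGrps_nil, pcJoinNl]
  | cons l t ih =>
    obtain ⟨ih1, ih2⟩ := ih
    by_cases h : pcIsFn l
    · have htw : ∀ x ∈ t.takeWhile (fun x => !pcIsFn x), pcIsFn x = false := by
        intro x hx
        simpa using List.mem_takeWhile_imp hx
      have enter : ∀ d : PySem.Dict String String,
          pcAFin (t.foldl pcAStep (d, l ++ "\n", pcName l)) =
            List.foldl pcStep (pcStep d (l :: t.takeWhile (fun x => !pcIsFn x)))
              (pcGrps (t.dropWhile (fun x => !pcIsFn x))) := by
        intro d
        by_cases hm : pcName l = ""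
        · rw [hm, ih1 d (l ++ "\n")]
          have hstep : pcStep d (l :: t.takeWhile (fun x => !pcIsFn x)) = d := by
            simp [pcStep, hm]
          have hgt : pcGrps t = pcGrps (t.dropWhile (fun x => !pcIsFn x)) := by
            conv_lhs => rw [← List.takeWhile_append_dropWhile (p := fun x => !pcIsFn x) (l := t)]
            exact pcGrps_append_notFn _ _ htw
          rw [hstep, hgt]
        · rw [ih2 d (l ++ "\n") (pcName l) hm]
          have hstep : pcStep d (l :: t.takeWhile (fun x => !pcIsFn x)) =
              d.insert (pcName l) (PySem.Str.strip
                (PySem.Str.join "\n" (l :: t.takeWhile (fun x => !pcIsFn x)))) := by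
            simp [pcStep, hm]
          have hv : PySem.Str.strip (l ++ "\n" ++ pcJoinNl (t.takeWhile (fun x => !pcIsFn x))) =
              PySem.Str.strip (PySem.Str.join "\n" (l :: t.takeWhile (fun x => !pcIsFn x))) :=
            pc_strip_joinNl _ _
          rw [hstep, hv]
      constructor
      · intro d c
        rw [List.foldl_cons]
        have hstate : pcAStep (d, c, "") l = (d, l ++ "\n", pcName l) := by
          simp [pcAStep, h]
        rw [hstate, pcGrps_cons_pos _ _ h, List.foldl_cons]
        exact enter d
      · intro d c n hn
        rw [List.foldl_cons]
        have hstate : pcAStep (d, c, n) l =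
            (d.insert n (PySem.Str.strip c), l ++ "\n", pcName l) := by
          simp [pcAStep, h, hn]
        rw [hstate]
        have hdrop : (l :: t).dropWhile (fun x => !pcIsFn x) = l :: t := by
          simp [h]
        have htake : (l :: t).takeWhile (fun x => !pcIsFn x) = [] := by
          simp [h]
        rw [hdrop, htake, pcGrps_cons_pos _ _ h, List.foldl_cons]
        rw [show c ++ pcJoinNl [] = c by simp [pcJoinNl]]
        exact enter (d.insert n (PySem.Str.strip c))
    · have hdrop : (l :: t).dropWhile (fun x => !pcIsFn x) = t.dropWhile (fun x => !pcIsFn x) := by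
        simp [h]
      have htake : (l :: t).takeWhile (fun x => !pcIsFn x) =
          l :: t.takeWhile (fun x => !pcIsFn x) := by
        simp [h]
      constructor
      · intro d c
        rw [List.foldl_cons]
        have hstate : pcAStep (d, c, "") l = (d, c ++ l ++ "\n", "") := by
          simp [pcAStep, h]
        rw [hstate, pcGrps_cons_neg _ _ (by simpa using h)]
        exact ih1 d (c ++ l ++ "\n")
      · intro d c n hn
        rw [List.foldl_cons]
        have hstate : pcAStep (d, c, n) l = (d, c ++ l ++ "\n", n) := by
          simp [pcAStep, h]
        rw [hstate, ih2 (d := d) (c := c ++ l ++ "\n") (n := n) hn, hdrop, htake]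
        congr 3
        rw [show pcJoinNl (l :: t.takeWhile (fun x => !pcIsFn x)) =
            l ++ "\n" ++ pcJoinNl (t.takeWhile (fun x => !pcIsFn x)) from rfl]
        simp [String.append_assoc]

-- B-side
lemma pcBounds_eq (t : List String) (s : Nat) :
    ((PySem.List.enumerate t (s : Int)).filter (fun p => pcIsFn p.2)).map (fun p => p.1)
      = (pcBnd s t).map (fun n : Nat => (n : Int)) := by
  induction t generalizing s with
  | nil => simp [pcBnd]
  | cons x t ih =>
    rw [PySem.List.enumerate_cons]
    by_cases h : pcIsFn x
    · simp only [List.filter_cons, h, List.map_cons, pcBnd, if_true]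
      rw [show (s : Int) + 1 = ((s + 1 : Nat) : Int) by push_cast; ring, ih]
    · simp only [List.filter_cons, h, pcBnd, Bool.false_eq_true, if_false]
      rw [show (s : Int) + 1 = ((s + 1 : Nat) : Int) by push_cast; ring, ih]

set_option maxHeartbeats 1000000 in
lemma pcB_main (N : Nat) (lines : List String) (hN : lines.length ≤ N) (d : PySem.Dict String String) :
    ((pcBnd 0 lines).zip ((pcBnd 0 lines).drop 1 ++ [lines.length])).foldl
        (fun d p => pcBStep lines d ((p.1 : Int), (p.2 : Int))) d
      = (pcGrps lines).foldl pcStep d := by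
  induction N generalizing lines d with
  | zero =>
    rw [List.length_eq_zero_iff.mp (Nat.le_zero.mp hN)]
    simp [pcBnd, pcGrps_nil]
  | succ N ihN =>
    rcases hd : lines.dropWhile (fun x => !pcIsFn x) with _ | ⟨l, t⟩
    · have hall : ∀ x ∈ lines, pcIsFn x = false := by
        intro x hx
        simpa using List.dropWhile_eq_nil_iff.mp hd x hx
      rw [pcBnd_eq_nil _ _ hall]
      have hg : pcGrps lines = [] := by
        simpa [pcGrps_nil] using pcGrps_append_notFn lines [] hall
      simp [hg]
    · have hl : pcIsFn l = true := by
        have := List.head_dropWhile_not (fun x => !pcIsFn x) (l := lines) (by simp [hd])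
        simp only [hd, List.head_cons] at this
        simpa using this
      have hsplit : lines = lines.takeWhile (fun x => !pcIsFn x) ++ l :: t := by
        conv_lhs => rw [← List.takeWhile_append_dropWhile (p := fun x => !pcIsFn x) (l := lines)]
        rw [hd]
      set a := lines.takeWhile (fun x => !pcIsFn x) with ha
      have hatw : ∀ x ∈ a, pcIsFn x = false := by
        intro x hx
        simpa using List.mem_takeWhile_imp hx
      have hbnd : pcBnd 0 lines = a.length :: (pcBnd 0 t).map (· + (a.length + 1)) := by
        rw [hsplit, pcBnd_append_notFn _ _ _ hatw]
        simp only [Nat.zero_add, pcBnd, hl, if_true]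
        rw [show a.length + 1 = 0 + (a.length + 1) by ring, pcBnd_shift]
        simp
      have hgrps : pcGrps lines = (l :: t.takeWhile (fun x => !pcIsFn x)) ::
          pcGrps (t.dropWhile (fun x => !pcIsFn x)) := by
        rw [hsplit, pcGrps_append_notFn _ _ hatw, pcGrps_cons_pos _ _ hl]
      have hlen : lines.length = a.length + 1 + t.length := by
        rw [hsplit]; simp; ring
      have hget : PySem.List.pyGetD lines ((a.length : Nat) : Int) "" = l := by
        rw [hsplit, PySem.List.pyGetD_natCast]
        simp [List.getD]
      have hslice : ∀ j : Nat,
          PySem.List.slice lines (some ((a.length : Nat) : Int))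
            (some ((a.length + 1 + j : Nat) : Int)) = l :: t.take j := by
        intro j
        rw [hsplit, PySem.List.slice_natCast, List.drop_append]
        simp [List.take_succ_cons, show a.length + 1 + j - a.length = j + 1 by omega]
      have hshift : ∀ (dd : PySem.Dict String String) (x y : Nat),
          pcBStep lines dd (((x + (a.length + 1) : Nat) : Int), ((y + (a.length + 1) : Nat) : Int))
            = pcBStep t dd ((x : Int), (y : Int)) := by
        intro dd x y
        have h1 : PySem.List.pyGetD lines ((x + (a.length + 1) : Nat) : Int) ""
            = PySem.List.pyGetD t ((x : Nat) : Int) "" := by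
          rw [hsplit, PySem.List.pyGetD_natCast, PySem.List.pyGetD_natCast]
          simp only [List.getD]
          rw [List.getElem?_append_right (by omega),
            show x + (a.length + 1) - a.length = x + 1 by omega, List.getElem?_cons_succ]
        have h2 : PySem.List.slice lines (some ((x + (a.length + 1) : Nat) : Int))
              (some ((y + (a.length + 1) : Nat) : Int))
            = PySem.List.slice t (some ((x : Nat) : Int)) (some ((y : Nat) : Int)) := by
          rw [hsplit, PySem.List.slice_natCast, PySem.List.slice_natCast, List.drop_append]
          rw [List.drop_eq_nil_of_le (by omega), List.nil_append,
            show x + (a.length + 1) - a.length = x + 1 by omega, List.drop_succ_cons,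
            show y + (a.length + 1) - (x + (a.length + 1)) = y - x by omega]
        simp only [pcBStep, h1, h2]
      cases hbt : pcBnd 0 t with
      | nil =>
        have hallt := pcBnd_nil_all t 0 hbt
        have htwt : t.takeWhile (fun x => !pcIsFn x) = t :=
          List.takeWhile_eq_self_iff.mpr (fun x hx => by simp [hallt x hx])
        have hdwt : t.dropWhile (fun x => !pcIsFn x) = [] :=
          List.dropWhile_eq_nil_iff.mpr (fun x hx => by simp [hallt x hx])
        rw [hbnd, hbt, hgrps, htwt, hdwt, pcGrps_nil]
        simp only [List.map_nil, List.drop_succ_cons, List.drop_nil, List.nil_append,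
          List.zip_cons_cons, List.zip_nil_right, List.foldl_cons, List.foldl_nil]
        have : pcBStep lines d ((a.length : Int), (lines.length : Int)) = pcStep d (l :: t) := by
          have := hslice t.length
          rw [List.take_length] at this
          simp only [pcBStep, pcStep, hget, hlen, this, List.headD_cons]
        exact this
      | cons i bs =>
        -- the first boundary of t sits right after t's non-boundary prefix
        have hi : i = (t.takeWhile (fun x => !pcIsFn x)).length := by
          rcases hdt : t.dropWhile (fun x => !pcIsFn x) with _ | ⟨l₂, t₂⟩
          · have hallt : ∀ x ∈ t, pcIsFn x = false := by
              intro x hx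
              simpa using List.dropWhile_eq_nil_iff.mp hdt x hx
            rw [pcBnd_eq_nil _ _ hallt] at hbt
            exact absurd hbt (by simp)
          · have hl₂ : pcIsFn l₂ = true := by
              have := List.head_dropWhile_not (fun x => !pcIsFn x) (l := t) (by simp [hdt])
              simp only [hdt, List.head_cons] at this
              simpa using this
            have htsplit : t = t.takeWhile (fun x => !pcIsFn x) ++ l₂ :: t₂ := by
              conv_lhs => rw [← List.takeWhile_append_dropWhile (p := fun x => !pcIsFn x) (l := t)]
              rw [hdt]
            have : pcBnd 0 t = (t.takeWhile (fun x => !pcIsFn x)).length :: pcBnd ((t.takeWhile (fun x => !pcIsFn x)).length + 1) t₂ := by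
              conv_lhs => rw [htsplit]
              rw [pcBnd_append_notFn _ _ _ (fun x hx => by simpa using List.mem_takeWhile_imp hx)]
              simp [pcBnd, hl₂]
            rw [hbt] at this
            exact (List.cons.injEq _ _ _ _ ▸ this).1
        have htake : t.take i = t.takeWhile (fun x => !pcIsFn x) := by
          rw [hi]
          exact (List.prefix_iff_eq_take.mp (List.takeWhile_prefix _)).symm
        rw [hbnd, hbt, hgrps]
        simp only [List.map_cons, List.drop_succ_cons, List.drop_zero, List.cons_append,
          List.zip_cons_cons, List.foldl_cons]
        have hfirst : pcBStep lines d ((a.length : Int), ((i + (a.length + 1) : Nat) : Int)) =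
            pcStep d (l :: t.takeWhile (fun x => !pcIsFn x)) := by
          have hs := hslice i
          rw [htake] at hs
          rw [show ((i + (a.length + 1) : Nat) : Int) = ((a.length + 1 + i : Nat) : Int) by push_cast; ring]
          simp only [pcBStep, pcStep, hget, hs, List.headD_cons]
        have hL : lines.length = t.length + (a.length + 1) := by omega
        have hrest : (pcBnd 0 t).map (· + (a.length + 1)) = (i :: bs).map (· + (a.length + 1)) := by
          rw [hbt]
        -- remaining pairs are the pairs of t, shifted
        have hzip : ((i + (a.length + 1)) :: bs.map (· + (a.length + 1))).zip
              (bs.map (· + (a.length + 1)) ++ [lines.length])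
            = ((i :: bs).zip (bs ++ [t.length])).map
                (Prod.map (· + (a.length + 1)) (· + (a.length + 1))) := by
          rw [hL, show ((t.length + (a.length + 1)) : Nat) = t.length + (a.length + 1) from rfl]
          rw [show bs.map (· + (a.length + 1)) ++ [t.length + (a.length + 1)]
              = (bs ++ [t.length]).map (· + (a.length + 1)) by simp]
          rw [show (i + (a.length + 1)) :: bs.map (· + (a.length + 1))
              = (i :: bs).map (· + (a.length + 1)) from rfl, List.zip_map]
        rw [hfirst, hzip, List.foldl_map]
        have hfun : (fun (dd : PySem.Dict String String) (p : Nat × Nat) =>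
              pcBStep lines dd (((Prod.map (· + (a.length + 1)) (· + (a.length + 1)) p).1 : Int),
                ((Prod.map (· + (a.length + 1)) (· + (a.length + 1)) p).2 : Int)))
            = fun dd p => pcBStep t dd ((p.1 : Int), (p.2 : Int)) := by
          funext dd p
          obtain ⟨x, y⟩ := p
          simpa [Prod.map] using hshift dd x y
        rw [hfun]
        have hih := ihN t (by omega) (pcStep d (l :: t.takeWhile (fun x => !pcIsFn x)))
        rw [hbt] at hih
        simp only [List.drop_succ_cons, List.drop_zero] at hih
        have hgt : pcGrps t = pcGrps (t.dropWhile (fun x => !pcIsFn x)) := by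
          conv_lhs => rw [← List.takeWhile_append_dropWhile (p := fun x => !pcIsFn x) (l := t)]
          exact pcGrps_append_notFn _ _ (fun x hx => by simpa using List.mem_takeWhile_imp hx)
        rw [hgt] at hih
        exact hih

-- ===== VERDICT (by name: the statement is the Claim_ definition above) =====
set_option maxHeartbeats 1000000 in
theorem parse_contract_code_spec : Claim_equal_parse_contract_code := by
  intro code _hdom
  unfold Spec_parse_contract_code parse_contract_code parse_contract_code_alt
  simp only []
  set lines := pySplit code "\n" with hlines
  -- A's loop computes the fold of pcStep over the segments
  rw [(pcA_main lines).1 PySem.Dict.empty ""]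
  -- B's boundary list is pcBnd 0, as Int casts
  have hb : ((PySem.List.enumerate lines).filter (fun p => pcIsFn p.2)).map (fun p => p.1)
      = (pcBnd 0 lines).map (fun n : Nat => (n : Int)) := by
    have hb0 := pcBounds_eq lines 0
    rw [show ((0 : Nat) : Int) = (0 : Int) from rfl] at hb0
    exact hb0
  rw [hb, PySem.List.slice_from_one]
  have htl : ((pcBnd 0 lines).map (fun n : Nat => (n : Int))).tail
      = ((pcBnd 0 lines).drop 1).map (fun n : Nat => (n : Int)) := by
    rw [List.drop_one]
    exact List.map_tail.symm
  rw [htl, show [((lines.length : Nat) : Int)] = [lines.length].map (fun n : Nat => (n : Int)) from rfl,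
    ← List.map_append, List.zip_map, List.foldl_map]
  have hfn : (fun (d : PySem.Dict String String) (p : Nat × Nat) =>
        pcBStep lines d (Prod.map (fun n : Nat => (n : Int)) (fun n : Nat => (n : Int)) p))
      = fun d p => pcBStep lines d ((p.1 : Int), (p.2 : Int)) := by
    funext d p
    obtain ⟨x, y⟩ := p
    rfl
  rw [hfn, pcB_main lines.length lines le_rfl PySem.Dict.empty]
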